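-- pv_equiv track=rewrite | github.com/lauchimoon/base64 | encode.py | get_6bit_chunks
-- ===== SOURCE A (Python) =====
-- def get_6bit_chunks(bin_string):
--     chunks = []
--     len_str = len(bin_string)
--
--     for i in range(0, len_str, 6):
--         chunks.append(bin_string[i:i+6])
--
--     # If a chunk doesn't have 6 bits, add as many ceroes as necessary
--     for ch in enumerate(chunks):
--         idx = ch[0]
--         len_ch = len(ch[1])
--         if len_ch != 6:
--             missing_zeros = 6 - len_ch
--             chunks[idx] += '0'*missing_zeros
--
--     # If the string's length is not a multiple of twenty-four, add padding
--     len_chunks = len(chunks)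
--     if len_str % 24 != 0:
--         missing_paddings = 4 - len_chunks % 4
--         for _ in range(missing_paddings):
--             chunks.append('0')
--
--     return chunks
-- ===== SOURCE B (Python) =====
-- def _chunk6(s):
--     chunks = []
--     while s:
--         chunks.append(s[:6])
--         s = s[6:]
--     return chunks
--
-- def get_6bit_chunks(bin_string):
--     padded = bin_string + '0' * (-len(bin_string) % 6)
--     chunks = _chunk6(padded)
--     if len(bin_string) % 24 != 0:
--         chunks += ['0'] * (4 - len(chunks) % 4)
--     return chunks
-- ===== Notes on version B (the rewrite author's own statement) =====
-- stated objective: simpler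
-- what changed: B computes the zero-padding in closed form ((-len) % 6), pads the string once up front, and chunks it with a simple while loop that takes the first six characters and drops them, replacing A's two-pass scheme (index-slice loop plus an enumerate loop that rewrites short chunks in place) and appending the trailing padding chunks in bulk instead of one per loop iteration.
import Mathlib
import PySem

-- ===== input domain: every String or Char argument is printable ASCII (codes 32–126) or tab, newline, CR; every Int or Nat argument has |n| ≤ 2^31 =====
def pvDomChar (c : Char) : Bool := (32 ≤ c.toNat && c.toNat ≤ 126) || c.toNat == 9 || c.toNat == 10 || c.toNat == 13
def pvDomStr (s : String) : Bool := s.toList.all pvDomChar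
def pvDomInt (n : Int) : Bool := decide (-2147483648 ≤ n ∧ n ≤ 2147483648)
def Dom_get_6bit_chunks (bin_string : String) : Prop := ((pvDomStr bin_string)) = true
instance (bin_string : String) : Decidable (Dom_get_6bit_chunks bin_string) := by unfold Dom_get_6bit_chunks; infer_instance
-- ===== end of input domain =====

-- B pads the input to a multiple of 6 up front ((-len) % 6) and chunks it by a simple take/drop
-- recursion, replacing A's slice loop plus in-place fix-up pass over enumerate; objective: simpler.


-- ===== PORT A =====
def get_6bit_chunks (bin_string : String) : List String :=
  let l := bin_string.toList
  let len_str : Int := PySem.Chars.len l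
  -- for i in range(0, len_str, 6): chunks.append(bin_string[i:i+6])
  let chunks : List (List Char) :=
    (PySem.List.pyRange 0 len_str 6).foldl
      (fun acc i => acc ++ [PySem.List.slice l (some i) (some (i + 6))]) []
  -- for ch in enumerate(chunks): … chunks[idx] += '0'*missing_zeros
  -- (Python mutates chunks[idx] only after the iterator has read index idx, so a fold with a
  --  functional set over the enumeration of the list as it was at loop entry is exact)
  let chunks := (PySem.List.enumerate chunks 0).foldl
      (fun cs ch =>
        let idx := ch.1
        let len_ch : Int := PySem.Chars.len ch.2
        if len_ch ≠ 6 then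
          PySem.List.pySetD cs idx (ch.2 ++ PySem.List.pyRepeat ['0'] (6 - len_ch))
        else cs)
      chunks
  let len_chunks : Int := PySem.List.len chunks
  -- if len_str % 24 != 0: for _ in range(missing_paddings): chunks.append('0')
  let chunks := if PySem.Int.mod len_str 24 ≠ 0 then
      (PySem.List.pyRange 0 (4 - PySem.Int.mod len_chunks 4) 1).foldl
        (fun acc _ => acc ++ [['0']]) chunks
    else chunks
  chunks.map String.ofList

-- ===== PORT B =====
-- _chunk6's while loop as tail recursion on the string it consumes;
-- s[:6] is take 6, s[6:] is drop 6 (PySem.List.slice_to_natCast / slice_from_natCast)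
def pvChunk6 (chunks : List (List Char)) : List Char → List (List Char)
  | [] => chunks
  | c :: cs => pvChunk6 (chunks ++ [(c :: cs).take 6]) ((c :: cs).drop 6)
termination_by l => l.length
decreasing_by simp

def get_6bit_chunks_alt (bin_string : String) : List String :=
  let l := bin_string.toList
  -- padded = bin_string + '0' * (-len(bin_string) % 6)
  let padded := l ++ PySem.List.pyRepeat ['0'] (PySem.Int.mod (-(PySem.Chars.len l)) 6)
  let chunks := pvChunk6 [] padded
  -- if len(bin_string) % 24 != 0: chunks += ['0'] * (4 - len(chunks) % 4)
  let chunks := if PySem.Int.mod (PySem.Chars.len l) 24 ≠ 0 then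
      chunks ++ PySem.List.pyRepeat [['0']] (4 - PySem.Int.mod (PySem.List.len chunks) 4)
    else chunks
  chunks.map String.ofList

-- ===== PRECONDITION & SPEC =====
def Spec_get_6bit_chunks (bin_string : String) (out : List String) : Prop := out = get_6bit_chunks_alt bin_string
instance (bin_string : String) (out : List String) : Decidable (Spec_get_6bit_chunks bin_string out) := by unfold Spec_get_6bit_chunks; infer_instance

-- ===== CLAIM (what is proved, stated in full; the proofs are below) =====
def Claim_equal_get_6bit_chunks : Prop := ∀ (bin_string : String), Dom_get_6bit_chunks bin_string → Spec_get_6bit_chunks bin_string (get_6bit_chunks bin_string)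

-- ===== LEMMAS AND PROOFS =====

-- proof-only helpers
def padN (n : Nat) : Nat := (6 - n % 6) % 6

def chunksN (l : List Char) : List (List Char) :=
  (List.range ((l.length + 5) / 6)).map (fun k => (l.drop (6 * k)).take 6)

def fixC (ch : List Char) : List Char :=
  if (PySem.Chars.len ch) ≠ 6 then ch ++ PySem.List.pyRepeat ['0'] (6 - PySem.Chars.len ch) else ch

def chunkRec : List Char → List (List Char)
  | [] => []
  | c :: cs => ((c :: cs).take 6) :: chunkRec ((c :: cs).drop 6)
termination_by l => l.length
decreasing_by simp

lemma chunkRec_cons (c : Char) (cs : List Char) :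
    chunkRec (c :: cs) = (c :: cs).take 6 :: chunkRec ((c :: cs).drop 6) := by
  rw [chunkRec]

lemma pvChunk6_eq : ∀ (l : List Char) (acc : List (List Char)), pvChunk6 acc l = acc ++ chunkRec l
  | [], acc => by simp [pvChunk6, chunkRec]
  | c :: cs, acc => by
    rw [show pvChunk6 acc (c :: cs) = pvChunk6 (acc ++ [(c :: cs).take 6]) ((c :: cs).drop 6) from by
          rw [pvChunk6],
        chunkRec_cons, pvChunk6_eq ((c :: cs).drop 6) (acc ++ [(c :: cs).take 6])]
    simp
termination_by l => l.length
decreasing_by simp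

lemma padM (n : Nat) : PySem.Int.mod (-(n : Int)) 6 = ((padN n : Nat) : Int) := by
  have h1 := PySem.Int.mod_nonneg (-(n : Int)) (b := 6) (by norm_num)
  have h2 := PySem.Int.mod_lt (-(n : Int)) (b := 6) (by norm_num)
  have h3 := PySem.Int.floordiv_mul_add_mod (-(n : Int)) 6
  unfold padN
  omega

lemma chunksN_cons (c : Char) (cs : List Char) :
    chunksN (c :: cs) = (c :: cs).take 6 :: chunksN ((c :: cs).drop 6) := by
  unfold chunksN
  have hlen : ((c :: cs).length + 5) / 6 = (((c :: cs).drop 6).length + 5) / 6 + 1 := by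
    simp only [List.length_drop, List.length_cons]
    omega
  rw [hlen, List.range_succ_eq_map, List.map_cons, List.map_map]
  refine congrArg₂ List.cons (by simp) ?_
  refine List.map_congr_left fun k _ => ?_
  show List.take 6 (List.drop (6 * (k + 1)) (c :: cs))
      = List.take 6 (List.drop (6 * k) (List.drop 6 (c :: cs)))
  rw [List.drop_drop]
  have : 6 * (k + 1) = 6 + 6 * k := by ring
  rw [this]

lemma pyRange6_map (l : List Char) :
    (PySem.List.pyRange 0 (l.length : Int) 6).map
      (fun i => PySem.List.slice l (some i) (some (i + 6))) = chunksN l := by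
  rw [PySem.List.pyRange_of_pos 0 (l.length : Int) (by norm_num), List.map_map]
  unfold chunksN
  have hcount : (if (0:Int) < (l.length : Int) then (((l.length : Int) - 0 + 6 - 1) / 6).toNat else 0)
      = (l.length + 5) / 6 := by
    split_ifs with h
    · omega
    · omega
  rw [hcount]
  refine List.map_congr_left fun k _ => ?_
  have h1 : (0 : Int) + 6 * (k : Int) = ((6 * k : Nat) : Int) := by push_cast; ring
  simp only [Function.comp, h1]
  have h2 : ((6 * k : Nat) : Int) + 6 = ((6 * k + 6 : Nat) : Int) := by push_cast; ring
  rw [h2, PySem.List.slice_natCast]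
  congr 1
  omega

lemma foldl_enum_set {α : Type} (P : α → Prop) [DecidablePred P] (g : α → α) :
    ∀ (cur pre : List α),
      (PySem.List.enumerate cur (pre.length : Int)).foldl
          (fun cs p => if P p.2 then PySem.List.pySetD cs p.1 (g p.2) else cs) (pre ++ cur)
        = pre ++ cur.map (fun x => if P x then g x else x) := by
  intro cur
  induction cur with
  | nil => intro pre; simp [PySem.List.enumerate_nil]
  | cons x cur ih =>
    intro pre
    rw [PySem.List.enumerate_cons, List.foldl_cons]
    have hstep : (if P x then PySem.List.pySetD (pre ++ x :: cur) ((pre.length : Int)) (g x)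
        else pre ++ x :: cur) = (pre ++ [if P x then g x else x]) ++ cur := by
      by_cases h : P x
      · simp [h, PySem.List.pySetD_natCast]
      · simp [h]
    rw [hstep]
    have hlen : (pre.length : Int) + 1 = (((pre ++ [if P x then g x else x]).length : Nat) : Int) := by
      simp
    rw [hlen, ih (pre ++ [if P x then g x else x])]
    simp

lemma map_fix_chunksN : ∀ (l : List Char),
    (chunksN l).map fixC = chunkRec (l ++ List.replicate (padN l.length) '0')
  | [] => by simp [chunksN, padN, chunkRec]
  | c :: cs => by
    have IH := map_fix_chunksN ((c :: cs).drop 6)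
    rw [chunksN_cons, List.map_cons]
    by_cases h6 : 6 ≤ (c :: cs).length
    · -- full leading chunk
      have hfix : fixC ((c :: cs).take 6) = (c :: cs).take 6 := by
        unfold fixC
        rw [if_neg (by simp only [List.length_cons] at h6; simp; omega)]
      have htail : ((c :: cs) ++ List.replicate (padN (c :: cs).length) '0')
          = c :: (cs ++ List.replicate (padN (c :: cs).length) '0') := by simp
      rw [htail, chunkRec_cons, ← htail]
      rw [List.take_append_of_le_length h6, List.drop_append_of_le_length h6]
      have hpad : padN ((c :: cs).drop 6).length = padN (c :: cs).length := by
        unfold padN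
        simp only [List.length_drop, List.length_cons] at h6 ⊢
        omega
      rw [hfix, ← hpad, IH]
    · -- short final chunk: 0 < length < 6
      have hn : (c :: cs).length ≤ 6 := by omega
      have htake : (c :: cs).take 6 = c :: cs := List.take_of_length_le hn
      have hdrop : (c :: cs).drop 6 = [] := List.drop_eq_nil_of_le hn
      have hfix : fixC (c :: cs) = (c :: cs) ++ List.replicate (6 - (c :: cs).length) '0' := by
        unfold fixC
        have hne : (PySem.Chars.len (c :: cs)) ≠ 6 := by
          simp only [PySem.Chars.len_eq, List.length_cons] at *
          omega
        rw [if_pos hne]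
        congr 1
        rw [PySem.List.pyRepeat_singleton]
        congr 1
        simp only [PySem.Chars.len_eq, List.length_cons] at *
        omega
      have hpad : padN (c :: cs).length = 6 - (c :: cs).length := by
        unfold padN
        simp only [List.length_cons] at *
        omega
      rw [htake, hdrop, hfix, hpad]
      have hfull : ((c :: cs) ++ List.replicate (6 - (c :: cs).length) '0')
          = c :: (cs ++ List.replicate (6 - (c :: cs).length) '0') := by simp
      rw [hfull, chunkRec_cons, ← hfull]
      have h1 : ((c :: cs) ++ List.replicate (6 - (c :: cs).length) '0').length = 6 := by
        simp only [List.length_append, List.length_replicate, List.length_cons] at *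
        omega
      rw [List.take_of_length_le (by omega), List.drop_eq_nil_of_le (by omega)]
      simp [chunksN, chunkRec]
termination_by l => l.length
decreasing_by simp

-- A's chunk-building passes equal B's pad-then-chunk
lemma stage2 (l : List Char) :
    (PySem.List.enumerate
        ((PySem.List.pyRange 0 (l.length : Int) 6).foldl
          (fun acc i => acc ++ [PySem.List.slice l (some i) (some (i + 6))]) [])).foldl
      (fun cs ch => if ((ch.2.length : Int)) ≠ 6 then
          PySem.List.pySetD cs ch.1 (ch.2 ++ PySem.List.pyRepeat ['0'] (6 - (ch.2.length : Int)))
        else cs)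
      ((PySem.List.pyRange 0 (l.length : Int) 6).foldl
          (fun acc i => acc ++ [PySem.List.slice l (some i) (some (i + 6))]) [])
    = pvChunk6 [] (l ++ PySem.List.pyRepeat ['0'] (PySem.Int.mod (-(l.length : Int)) 6)) := by
  have h1 : (PySem.List.pyRange 0 (l.length : Int) 6).foldl
      (fun acc i => acc ++ [PySem.List.slice l (some i) (some (i + 6))]) [] = chunksN l := by
    rw [PySem.List.foldl_append_singleton_eq_map, List.nil_append, pyRange6_map]
  rw [h1]
  have h2 := foldl_enum_set (fun ch : List Char => ((ch.length : Int)) ≠ 6)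
      (fun ch => ch ++ PySem.List.pyRepeat ['0'] (6 - (ch.length : Int))) (chunksN l) []
  simp only [List.length_nil, Nat.cast_zero, List.nil_append] at h2
  rw [h2]
  have h3 : l ++ PySem.List.pyRepeat ['0'] (PySem.Int.mod (-(l.length : Int)) 6)
      = l ++ List.replicate (padN l.length) '0' := by
    rw [padM, PySem.List.pyRepeat_singleton]
    simp
  rw [h3, pvChunk6_eq (l ++ List.replicate (padN l.length) '0') [], List.nil_append, ← map_fix_chunksN]
  refine List.map_congr_left fun x _ => ?_
  unfold fixC
  simp only [PySem.Chars.len_eq]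

lemma padloop (C : List (List Char)) (m : Int) (hm : 0 ≤ m) :
    (PySem.List.pyRange 0 m 1).foldl (fun acc _ => acc ++ [['0']]) C
      = C ++ PySem.List.pyRepeat [['0']] m := by
  rw [PySem.List.foldl_append_singleton_eq_map (f := fun _ => ['0']),
    PySem.List.pyRepeat_singleton, List.map_const', PySem.List.length_pyRange_one]
  congr 2
  omega

-- ===== VERDICT (by name: the statement is the Claim_ definition above) =====
theorem get_6bit_chunks_spec : Claim_equal_get_6bit_chunks := by
  intro s _
  unfold Spec_get_6bit_chunks get_6bit_chunks get_6bit_chunks_alt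
  simp only [PySem.Chars.len_eq]
  rw [stage2 s.toList]
  congr 1
  by_cases h24 : PySem.Int.mod ((s.toList.length : Nat) : Int) 24 ≠ 0
  · rw [if_pos h24, if_pos h24]
    refine padloop _ _ ?_
    have hx := PySem.Int.mod_nonneg (PySem.List.len (pvChunk6 [] (s.toList ++ PySem.List.pyRepeat ['0'] (PySem.Int.mod (-(s.toList.length : Int)) 6)))) (b := 4) (by norm_num)
    have hy := PySem.Int.mod_lt (PySem.List.len (pvChunk6 [] (s.toList ++ PySem.List.pyRepeat ['0'] (PySem.Int.mod (-(s.toList.length : Int)) 6)))) (b := 4) (by norm_num)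
    omega
  · rw [if_neg h24, if_neg h24]
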